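-- pv_equiv track=rewrite | github.com/rickardvh/agentic-workspace | packages/memory/src/repo_memory_bootstrap/_installer_memory.py | _dedupe_route_suggestions
-- ===== SOURCE A (Python) =====
-- from typing import Iterable
--
-- def _dedupe_route_suggestions(
--     suggestions: Iterable[tuple[str, str, str, str, int]],
-- ) -> list[tuple[str, str, str, str, int]]:
--     by_note: dict[str, tuple[str, str, str, str, int]] = {}
--     for recommendation, note, reason, match_source, priority in suggestions:
--         current = by_note.get(note)
--         if current is None:
--             by_note[note] = (recommendation, note, reason, match_source, priority)
--             continue
--         current_required = current[0] == "required"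
--         incoming_required = recommendation == "required"
--         if incoming_required and not current_required:
--             by_note[note] = (recommendation, note, reason, match_source, priority)
--             continue
--         if incoming_required == current_required and priority < current[4]:
--             by_note[note] = (recommendation, note, reason, match_source, priority)
--     return sorted(by_note.values(), key=lambda item: (0 if item[0] == "required" else 1, item[4], item[1]))
-- ===== SOURCE B (Python) =====
-- def _dedupe_route_suggestions(suggestions):
--     groups = {}
--     for item in suggestions:
--         groups.setdefault(item[1], []).append(item)
--     best = [min(g, key=lambda it: (0 if it[0] == "required" else 1, it[4]))
--             for g in groups.values()]
--     return sorted(best, key=lambda it: (0 if it[0] == "required" else 1, it[4], it[1]))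
-- ===== Notes on version B (the rewrite author's own statement) =====
-- stated objective: alternative
-- what changed: Replaces A's streaming best-so-far dict update (branching on required-flag and priority per incoming item) by a group-then-reduce pass: bucket all tuples by note preserving insertion order, then pick each group's representative with min over the key (required-flag, priority), whose first-match stability reproduces A's first-seen tie-break.
import Mathlib
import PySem

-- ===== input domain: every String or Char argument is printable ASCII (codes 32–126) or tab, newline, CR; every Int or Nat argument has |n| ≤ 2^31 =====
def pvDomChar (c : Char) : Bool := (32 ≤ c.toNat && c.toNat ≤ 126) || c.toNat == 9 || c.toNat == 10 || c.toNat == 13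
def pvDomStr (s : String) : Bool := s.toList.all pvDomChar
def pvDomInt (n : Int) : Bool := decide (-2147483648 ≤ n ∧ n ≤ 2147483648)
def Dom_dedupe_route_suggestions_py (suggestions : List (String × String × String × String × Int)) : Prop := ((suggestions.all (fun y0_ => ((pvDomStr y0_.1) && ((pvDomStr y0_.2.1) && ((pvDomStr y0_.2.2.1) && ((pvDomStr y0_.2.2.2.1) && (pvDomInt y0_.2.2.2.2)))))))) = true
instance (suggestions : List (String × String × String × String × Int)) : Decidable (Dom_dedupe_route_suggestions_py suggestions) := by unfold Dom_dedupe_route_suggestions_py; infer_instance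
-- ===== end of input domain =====

-- B replaces A's streaming best-so-far dict update by a group-by-note-then-reduce-with-min pass (objective: alternative decomposition, same cost).

-- ===== PORT A =====
-- loop body of A's 'for recommendation, note, reason, match_source, priority in suggestions'
-- (item = (recommendation, note, reason, match_source, priority))
def pvStepA (by_note : PySem.Dict String (String × String × String × String × Int))
    (item : String × String × String × String × Int) :
    PySem.Dict String (String × String × String × String × Int) :=
  match by_note.get? item.2.1 with
  | none => by_note.insert item.2.1 item
  | some current =>
    let current_required := current.1 == "required"
    let incoming_required := item.1 == "required"
    if incoming_required && !current_required then by_note.insert item.2.1 item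
    else if (incoming_required == current_required) && decide (item.2.2.2.2 < current.2.2.2.2) then
      by_note.insert item.2.1 item
    else by_note

-- key=lambda item: (0 if item[0] == "required" else 1, item[4], item[1]) — lexicographic 3-tuple via toLex
def dedupe_route_suggestions_py (suggestions : List (String × String × String × String × Int)) : List (String × String × String × String × Int) :=
  let by_note := suggestions.foldl pvStepA PySem.Dict.empty
  PySem.List.sorted by_note.values
    (fun item => toLex ((if item.1 == "required" then (0 : Int) else 1), toLex (item.2.2.2.2, item.2.1))) false

-- ===== PORT B =====
-- the two components of Source B's min key (0 if it[0] == "required" else 1, it[4])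
def pvK1 (it : String × String × String × String × Int) : Int := if it.1 == "required" then 0 else 1
def pvK2 (it : String × String × String × String × Int) : Int := it.2.2.2.2

-- loop body of Source B: 'groups.setdefault(item[1], []).append(item)' (= groups[item[1]] = groups.get(item[1], []) + [item])
def pvStepB (groups : PySem.Dict String (List (String × String × String × String × Int)))
    (item : String × String × String × String × Int) :
    PySem.Dict String (List (String × String × String × String × Int)) :=
  groups.modify item.2.1 [] (fun g => g ++ [item])

def dedupe_route_suggestions_py_alt (suggestions : List (String × String × String × String × Int)) : List (String × String × String × String × Int) :=
  let groups := suggestions.foldl pvStepB PySem.Dict.empty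
  -- min(g, key=…): filterMap because Python's min would raise on an empty group (groups' values are never empty)
  let best := groups.values.filterMap (fun g => PySem.List.min2? g pvK1 pvK2)
  PySem.List.sorted best
    (fun item => toLex ((if item.1 == "required" then (0 : Int) else 1), toLex (item.2.2.2.2, item.2.1))) false

-- ===== PRECONDITION & SPEC =====
def Spec_dedupe_route_suggestions_py (suggestions : List (String × String × String × String × Int)) (out : List (String × String × String × String × Int)) : Prop := out = dedupe_route_suggestions_py_alt suggestions
instance (suggestions : List (String × String × String × String × Int)) (out : List (String × String × String × String × Int)) : Decidable (Spec_dedupe_route_suggestions_py suggestions out) := by unfold Spec_dedupe_route_suggestions_py; infer_instance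

-- ===== CLAIM (what is proved, stated in full; the proofs are below) =====
def Claim_equal_dedupe_route_suggestions_py : Prop := ∀ (suggestions : List (String × String × String × String × Int)), Dom_dedupe_route_suggestions_py suggestions → Spec_dedupe_route_suggestions_py suggestions (dedupe_route_suggestions_py suggestions)

-- ===== LEMMAS AND PROOFS =====

-- min's replacement test on Source B's tuple key, and min(h :: t, key) as a running fold over t
def pvMCond (x m : String × String × String × String × Int) : Bool :=
  decide (pvK1 x < pvK1 m) || (!decide (pvK1 m < pvK1 x) && decide (pvK2 x < pvK2 m))

def pvRun (m : String × String × String × String × Int) (t : List (String × String × String × String × Int)) :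
    String × String × String × String × Int :=
  t.foldl (fun m x => if pvMCond x m then x else m) m

def pvB1 (g : List (String × String × String × String × Int)) : String × String × String × String × Int :=
  match g with
  | [] => ("", "", "", "", 0)
  | h :: t => pvRun h t

def pvMStep (acc : Option (String × String × String × String × Int))
    (x : String × String × String × String × Int) : Option (String × String × String × String × Int) :=
  match acc with
  | none => some x
  | some m => if pvMCond x m then some x else some m

-- the simulation map: a (note, group) item of B's dict to the corresponding (note, best) item of A's dict
def pvFA (p : String × List (String × String × String × String × Int)) :
    String × (String × String × String × String × Int) := (p.1, pvB1 p.2)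

theorem pvMin2?_cons (h : String × String × String × String × Int) (t) :
    PySem.List.min2? (h :: t) pvK1 pvK2 = t.foldl pvMStep (some h) := by
  unfold PySem.List.min2? pvMStep pvMCond
  rw [List.foldl_cons]
  congr 1
  funext acc x
  cases acc <;> rfl

theorem pvRun_eq : ∀ (t : List (String × String × String × String × Int)) (m),
    t.foldl pvMStep (some m) = some (pvRun m t) := by
  intro t
  induction t with
  | nil => intro m; rfl
  | cons a t ih =>
    intro m
    rw [List.foldl_cons, show pvMStep (some m) a = some (if pvMCond a m then a else m) from (apply_ite some (pvMCond a m) a m).symm, ih]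
    rfl

theorem pvMin2?_eq_some : ∀ (g : List (String × String × String × String × Int)), g ≠ [] →
    PySem.List.min2? g pvK1 pvK2 = some (pvB1 g) := by
  intro g hg
  match g with
  | h :: t => rw [pvMin2?_cons, pvRun_eq]; rfl

-- A's nested replacement branches are exactly min's tuple-key comparison against the current best
theorem pvStepA_restructured (d : PySem.Dict String (String × String × String × String × Int))
    (x : String × String × String × String × Int) :
    pvStepA d x = match d.get? x.2.1 with
      | none => d.insert x.2.1 x
      | some c => if pvMCond x c then d.insert x.2.1 x else d := by
  unfold pvStepA
  cases d.get? x.2.1 with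
  | none => rfl
  | some c =>
    simp only [pvMCond, pvK1, pvK2]
    by_cases hx : x.1 == "required" <;> by_cases hc : c.1 == "required" <;>
      simp [hx, hc]

theorem pvB1_append (g : List (String × String × String × String × Int)) (hg : g ≠ [])
    (x : String × String × String × String × Int) :
    pvB1 (g ++ [x]) = if pvMCond x (pvB1 g) then x else pvB1 g := by
  match g with
  | h :: t => simp [pvB1, pvRun, List.foldl_append]

theorem pvGet?_map (d : PySem.Dict String (List (String × String × String × String × Int))) (k : String) :
    (PySem.Dict.mk (d.items.map pvFA)).get? k = (d.get? k).map pvB1 := by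
  simp [PySem.Dict.get?, List.find?_map, Function.comp_def, pvFA, Option.map_map]

theorem pvContains_map (d : PySem.Dict String (List (String × String × String × String × Int))) (k : String) :
    (PySem.Dict.mk (d.items.map pvFA)).contains k = d.contains k := by
  simp [PySem.Dict.contains, List.any_map, Function.comp_def, pvFA]

-- one step of both loops preserves the simulation
theorem pvStep_sim (dG : PySem.Dict String (List (String × String × String × String × Int)))
    (hne : ∀ p ∈ dG.items, p.2 ≠ []) (hnd : dG.keys.Nodup)
    (x : String × String × String × String × Int) :
    pvStepA (PySem.Dict.mk (dG.items.map pvFA)) x = PySem.Dict.mk ((pvStepB dG x).items.map pvFA) := by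
  rw [pvStepA_restructured]
  rw [pvGet?_map]
  show _ = PySem.Dict.mk ((PySem.Dict.modify dG x.2.1 [] (fun g => g ++ [x])).items.map pvFA)
  rw [PySem.Dict.modify]
  cases hg : dG.get? x.2.1 with
  | none =>
    have hc : dG.contains x.2.1 = false := (PySem.Dict.get?_eq_none_iff_contains dG x.2.1).mp hg
    have hgd : dG.getD x.2.1 [] = [] := by rw [PySem.Dict.getD_eq_get?_getD, hg]; rfl
    simp only [Option.map_none]
    apply PySem.Dict.ext
    rw [PySem.Dict.items_insert_of_not_contains _ _ (by rw [pvContains_map]; exact hc)]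
    rw [show (PySem.Dict.mk ((PySem.Dict.insert dG x.2.1 (dG.getD x.2.1 [] ++ [x])).items.map pvFA)).items
          = (PySem.Dict.insert dG x.2.1 (dG.getD x.2.1 [] ++ [x])).items.map pvFA from rfl]
    rw [PySem.Dict.items_insert_of_not_contains _ _ hc, hgd]
    simp [pvFA, pvB1, pvRun]
  | some g =>
    have hgne : g ≠ [] := by
      have hmem := PySem.Dict.mem_items_of_get?_eq_some (d := dG) hg
      exact hne _ hmem
    have hc : dG.contains x.2.1 = true := by
      cases hcc : dG.contains x.2.1 with
      | false => rw [(PySem.Dict.get?_eq_none_iff_contains dG x.2.1).mpr hcc] at hg; cases hg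
      | true => rfl
    have hgd : dG.getD x.2.1 [] = g := by rw [PySem.Dict.getD_eq_get?_getD, hg]; rfl
    simp only [Option.map_some]
    rw [hgd]
    apply PySem.Dict.ext
    by_cases mc : pvMCond x (pvB1 g)
    · rw [if_pos mc]
      rw [show (PySem.Dict.mk ((PySem.Dict.insert dG x.2.1 (g ++ [x])).items.map pvFA)).items
            = (PySem.Dict.insert dG x.2.1 (g ++ [x])).items.map pvFA from rfl]
      rw [PySem.Dict.items_insert_of_contains _ _ (by rw [pvContains_map]; exact hc)]
      rw [PySem.Dict.items_insert_of_contains _ _ hc]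
      show (dG.items.map pvFA).map (fun p => if p.1 == x.2.1 then (x.2.1, x) else p) = _
      rw [List.map_map, List.map_map]
      apply List.map_congr_left
      intro p hp
      simp only [Function.comp_def, pvFA]
      by_cases hk : p.1 = x.2.1
      · simp [hk, pvB1_append g hgne x, mc]
      · simp [hk]
    · rw [if_neg mc]
      show dG.items.map pvFA = _
      rw [show (PySem.Dict.mk ((PySem.Dict.insert dG x.2.1 (g ++ [x])).items.map pvFA)).items
            = (PySem.Dict.insert dG x.2.1 (g ++ [x])).items.map pvFA from rfl]
      rw [PySem.Dict.items_insert_of_contains _ _ hc, List.map_map]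
      apply List.map_congr_left
      intro p hp
      simp only [Function.comp_def, pvFA]
      by_cases hk : p.1 = x.2.1
      · have : dG.get? p.1 = some p.2 := by
          apply PySem.Dict.get?_of_mem_items dG (by exact (show (p.1, p.2) ∈ dG.items by simpa using hp)) hnd
        rw [hk] at this; rw [hg] at this
        have hpg : p.2 = g := by injection this.symm
        simp [hk, hpg, pvB1_append g hgne x, mc]
      · simp [hk]

theorem pvStepB_inv (dG : PySem.Dict String (List (String × String × String × String × Int)))
    (hne : ∀ p ∈ dG.items, p.2 ≠ []) (hnd : dG.keys.Nodup)
    (x : String × String × String × String × Int) :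
    (∀ p ∈ (pvStepB dG x).items, p.2 ≠ []) ∧ (pvStepB dG x).keys.Nodup := by
  constructor
  · intro p hp
    rw [show pvStepB dG x = dG.insert x.2.1 (dG.getD x.2.1 [] ++ [x]) from rfl] at hp
    rcases (PySem.Dict.mem_items_insert _ _ _ _).mp hp with h | h
    · rw [h]; simp
    · exact hne _ h.1
  · exact PySem.Dict.nodup_keys_insert _ _ _ hnd

theorem pvFold_sim : ∀ (l : List (String × String × String × String × Int))
    (dG : PySem.Dict String (List (String × String × String × String × Int))),
    (∀ p ∈ dG.items, p.2 ≠ []) → dG.keys.Nodup →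
    (l.foldl pvStepA (PySem.Dict.mk (dG.items.map pvFA)) = PySem.Dict.mk ((l.foldl pvStepB dG).items.map pvFA))
    ∧ (∀ p ∈ (l.foldl pvStepB dG).items, p.2 ≠ []) ∧ (l.foldl pvStepB dG).keys.Nodup := by
  intro l
  induction l with
  | nil => intro dG hne hnd; exact ⟨rfl, hne, hnd⟩
  | cons x t ih =>
    intro dG hne hnd
    obtain ⟨hne', hnd'⟩ := pvStepB_inv dG hne hnd x
    obtain ⟨h1, h2, h3⟩ := ih (pvStepB dG x) hne' hnd'
    refine ⟨?_, h2, h3⟩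
    rw [List.foldl_cons, List.foldl_cons, pvStep_sim dG hne hnd x]
    exact h1

theorem pvFilterMap_min (L : List (List (String × String × String × String × Int)))
    (h : ∀ g ∈ L, g ≠ []) :
    L.filterMap (fun g => PySem.List.min2? g pvK1 pvK2) = L.map pvB1 := by
  induction L with
  | nil => rfl
  | cons g t ih =>
    rw [List.filterMap_cons, pvMin2?_eq_some g (h g (by simp)), List.map_cons,
      ih (fun g hg => h g (by simp [hg]))]

-- ===== VERDICT (by name: the statement is the Claim_ definition above) =====
theorem dedupe_route_suggestions_py_spec : Claim_equal_dedupe_route_suggestions_py := by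
  unfold Claim_equal_dedupe_route_suggestions_py
  intro s _
  unfold Spec_dedupe_route_suggestions_py dedupe_route_suggestions_py dedupe_route_suggestions_py_alt
  obtain ⟨h1, h2, _⟩ := pvFold_sim s PySem.Dict.empty (by intro p hp; cases hp) List.nodup_nil
  have h1' : s.foldl pvStepA PySem.Dict.empty
      = PySem.Dict.mk ((s.foldl pvStepB PySem.Dict.empty).items.map pvFA) := h1
  rw [h1']
  simp only [PySem.Dict.values]
  congr 1
  rw [pvFilterMap_min _ (by
    intro g hg
    simp only [List.mem_map] at hg
    obtain ⟨p, hp, hpg⟩ := hg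
    rw [← hpg]; exact h2 p hp)]
  simp [List.map_map, Function.comp_def, pvFA]
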